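-- pv_equiv track=rewrite | github.com/primrose101/CS322 | finite_state_machines/keywords.py | kwoutput_fsm
-- ===== SOURCE A (Python) =====
-- def kwoutput_fsm(string_input, index):
--     i = index
--
--     table = [
--         [1, 7, 7, 7, 7, 7, 7],
--         [7, 2, 7, 7, 7, 7, 7],
--         [7, 7, 3, 7, 7, 7, 7],
--         [7, 7, 7, 4, 7, 7, 7],
--         [7, 5, 7, 7, 7, 7, 7],
--         [7, 7, 6, 7, 7, 7, 7],
--         [7, 7, 7, 7, 7, 7, 7],
--         [7, 7, 7, 7, 7, 7, 7],
--     ]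
--
--     state = 0
--     inputstate = 0
--
--     string_length = len(string_input)
--
--     while i != string_length:
--         if string_input[i] == 'O':
--             inputstate = 0
--         elif string_input[i] == 'U':
--             inputstate = 1
--         elif string_input[i] == 'T':
--             inputstate = 2
--         elif string_input[i] == 'P':
--             inputstate = 3
--         elif string_input[i] == 'U':
--             inputstate = 4
--         elif string_input[i] == 'T':
--             inputstate = 5
--         else:
--             inputstate = 6
--
--         state = table[state][inputstate]
--
--         if state == 7:
--             break
--
--         i += 1
--
--     return i - index
-- ===== SOURCE B (Python) =====
-- def kwoutput_fsm(string_input, index):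
--     keyword = "OUTPUT"
--     i = index
--     count = 0
--     while count < 6 and i != len(string_input) and string_input[i] == keyword[count]:
--         i += 1
--         count += 1
--     return count
-- ===== Notes on version B (the rewrite author's own statement) =====
-- stated objective: simpler
-- what changed: Replaced the 8x7 DFA transition table and the input-classification if/elif chain by a direct character-by-character comparison against the literal keyword "OUTPUT", keeping only a match counter capped at 6.
import Mathlib
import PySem

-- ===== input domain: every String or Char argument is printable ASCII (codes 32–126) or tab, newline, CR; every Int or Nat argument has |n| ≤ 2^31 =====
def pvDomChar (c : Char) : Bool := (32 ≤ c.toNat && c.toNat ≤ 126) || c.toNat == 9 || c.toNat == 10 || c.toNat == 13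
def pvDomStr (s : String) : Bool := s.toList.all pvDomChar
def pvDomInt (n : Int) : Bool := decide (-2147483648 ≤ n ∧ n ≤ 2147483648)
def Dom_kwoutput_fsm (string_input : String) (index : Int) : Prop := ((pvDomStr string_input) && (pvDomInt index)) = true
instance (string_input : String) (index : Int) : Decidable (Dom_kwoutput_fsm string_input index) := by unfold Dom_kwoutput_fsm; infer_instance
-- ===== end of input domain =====

-- B replaces A's DFA transition table and if/elif input classification by a direct
-- comparison loop against the literal keyword "OUTPUT" (objective: simpler).

-- ===== PORT A =====
def pvTable : List (List Int) :=
  [[1, 7, 7, 7, 7, 7, 7],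
   [7, 2, 7, 7, 7, 7, 7],
   [7, 7, 3, 7, 7, 7, 7],
   [7, 7, 7, 4, 7, 7, 7],
   [7, 5, 7, 7, 7, 7, 7],
   [7, 7, 6, 7, 7, 7, 7],
   [7, 7, 7, 7, 7, 7, 7],
   [7, 7, 7, 7, 7, 7, 7]]

-- A's while loop; fuel bounds the iteration count (one unit per pass).
-- On the IndexError access (pyGet? = none, excluded by Pre_) it returns the current i.
def pvALoop (s : List Char) (stringLength : Int) : Nat → Int → Int → Int
  | 0, _, i => i
  | fuel + 1, state, i =>
    if i = stringLength then i
    else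
      match PySem.List.pyGet? s i with
      | none => i  -- Python raises IndexError here; outside Pre_
      | some c =>
        let inputstate : Int :=
          if c = 'O' then 0
          else if c = 'U' then 1
          else if c = 'T' then 2
          else if c = 'P' then 3
          else if c = 'U' then 4  -- dead branch, kept from A
          else if c = 'T' then 5  -- dead branch, kept from A
          else 6
        let state' := PySem.List.pyGetD (PySem.List.pyGetD pvTable state []) inputstate 7
        if state' = 7 then i
        else pvALoop s stringLength fuel state' (i + 1)

def kwoutput_fsm (string_input : String) (index : Int) : Int :=
  let stringLength := PySem.Str.len string_input
  pvALoop string_input.toList stringLength ((stringLength - index).toNat + 1) 0 index - index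

-- ===== PORT B =====
-- B's while loop: count < 6 bounds it, so fuel 7 is enough.
def pvBLoop (s : List Char) (stringLength : Int) : Nat → Int → Int → Int
  | 0, _, count => count
  | fuel + 1, i, count =>
    if count < 6 ∧ i ≠ stringLength ∧
        PySem.List.pyGet? s i = PySem.List.pyGet? "OUTPUT".toList count then
      pvBLoop s stringLength fuel (i + 1) (count + 1)
    else count

def kwoutput_fsm_alt (string_input : String) (index : Int) : Int :=
  pvBLoop string_input.toList (PySem.Str.len string_input) 7 index 0

-- ===== PRECONDITION & SPEC =====
-- Pre_ excludes exactly the inputs where Python A raises IndexError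
-- (index outside [-len, len]); B raises the same IndexError there.
def Pre_kwoutput_fsm (string_input : String) (index : Int) : Prop :=
  -(PySem.Str.len string_input) ≤ index ∧ index ≤ PySem.Str.len string_input
instance (string_input : String) (index : Int) : Decidable (Pre_kwoutput_fsm string_input index) := by
  unfold Pre_kwoutput_fsm; infer_instance

def pvWitness_kwoutput_fsm : String × Int := ("say OUTPUT now", 4)

def Spec_kwoutput_fsm (string_input : String) (index : Int) (out : Int) : Prop := out = kwoutput_fsm_alt string_input index
instance (string_input : String) (index : Int) (out : Int) : Decidable (Spec_kwoutput_fsm string_input index out) := by unfold Spec_kwoutput_fsm; infer_instance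

-- ===== CLAIM (what is proved, stated in full; the proofs are below) =====
def Claim_equal_kwoutput_fsm : Prop := ∀ (string_input : String) (index : Int), Dom_kwoutput_fsm string_input index → Pre_kwoutput_fsm string_input index → Spec_kwoutput_fsm string_input index (kwoutput_fsm string_input index)

-- ===== LEMMAS AND PROOFS =====

-- One table step from state k (k < 6): advance to k+1 exactly when the input char
-- is the k-th keyword char, else go to the dead state 7.
theorem pv_step (c : Char) (k : Int) (h0 : 0 ≤ k) (h6 : k < 6) :
    PySem.List.pyGetD (PySem.List.pyGetD pvTable k [])
      (if c = 'O' then 0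
        else if c = 'U' then 1
        else if c = 'T' then 2
        else if c = 'P' then 3
        else if c = 'U' then 4
        else if c = 'T' then 5
        else 6) 7
    = if some c = PySem.List.pyGet? "OUTPUT".toList k then k + 1 else 7 := by
  interval_cases k <;>
    by_cases hO : c = 'O' <;> by_cases hU : c = 'U' <;>
    by_cases hT : c = 'T' <;> by_cases hP : c = 'P' <;>
    simp_all <;> decide

-- From state 6 every input char leads to the dead state 7.
theorem pv_step6 (c : Char) :
    PySem.List.pyGetD (PySem.List.pyGetD pvTable 6 [])
      (if c = 'O' then 0
        else if c = 'U' then 1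
        else if c = 'T' then 2
        else if c = 'P' then 3
        else if c = 'U' then 4
        else if c = 'T' then 5
        else 6) 7 = 7 := by
  split_ifs <;> decide

theorem pv_loop_eq (fa : Nat) : ∀ (s : List Char) (i k : Int) (fb : Nat),
    -((s.length : Int)) ≤ i → i ≤ (s.length : Int) → 0 ≤ k → k ≤ 6 →
    ((s.length : Int) - i).toNat < fa → (6 - k).toNat < fb →
    pvALoop s (s.length : Int) fa k i = i - k + pvBLoop s (s.length : Int) fb i k := by
  induction fa with
  | zero => intro s i k fb _ _ _ _ hfa _; omega
  | succ n ih =>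
    intro s i k fb hlo hhi hk0 hk6 hfa hfb
    obtain ⟨m, rfl⟩ : ∃ m, fb = m + 1 := ⟨fb - 1, by omega⟩
    by_cases hiL : i = (s.length : Int)
    · subst hiL
      have hA : pvALoop s (s.length : Int) (n + 1) k (s.length : Int) = (s.length : Int) := by
        simp [pvALoop]
      have hB : pvBLoop s (s.length : Int) (m + 1) (s.length : Int) k = k := by
        simp [pvBLoop]
      rw [hA, hB]; omega
    · have hlt : i < (s.length : Int) := lt_of_le_of_ne hhi hiL
      obtain ⟨c, hc⟩ : ∃ d, PySem.List.pyGet? s i = some d := by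
        rcases h : PySem.List.pyGet? s i with _ | d
        · rw [PySem.List.pyGet?_eq_none_iff] at h
          exact absurd ⟨hlo, hlt⟩ h
        · exact ⟨d, rfl⟩
      simp only [pvALoop, pvBLoop, if_neg hiL, hc]
      by_cases hk : k = 6
      · subst hk
        rw [pv_step6 c, if_pos rfl, if_neg (by simp)]
        omega
      · rw [pv_step c k hk0 (by omega)]
        by_cases hm : some c = PySem.List.pyGet? "OUTPUT".toList k
        · rw [if_pos hm, if_neg (by omega : ¬ k + 1 = 7),
              if_pos ⟨by omega, hiL, hm⟩,
              ih s (i + 1) (k + 1) m (by omega) (by omega) (by omega) (by omega)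
                (by omega) (by omega)]
          omega
        · rw [if_neg hm, if_pos rfl, if_neg (by tauto)]
          omega

-- ===== VERDICT (by name: the statement is the Claim_ definition above) =====
theorem kwoutput_fsm_spec : Claim_equal_kwoutput_fsm := by
  intro s index _ hpre
  obtain ⟨h1, h2⟩ := hpre
  have hlen : PySem.Str.len s = (s.toList.length : Int) := by simp [PySem.Str.len_eq]
  rw [hlen] at h1 h2
  unfold Spec_kwoutput_fsm kwoutput_fsm kwoutput_fsm_alt
  rw [hlen]
  show pvALoop s.toList (s.toList.length : Int)
      (((s.toList.length : Int) - index).toNat + 1) 0 index - index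
    = pvBLoop s.toList (s.toList.length : Int) 7 index 0
  rw [pv_loop_eq _ s.toList index 0 7 h1 h2 (by omega) (by omega) (by omega) (by omega)]
  omega
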